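-- pv_equiv track=rewrite | github.com/rikkumahan/IDEA_LAB | main.py | is_content_site
-- ===== SOURCE A (Python) =====
-- CONTENT_SITE_DOMAINS = {
--     # Social/Discussion platforms
--     'reddit.com', 'quora.com', 'stackexchange.com', 'stackoverflow.com',
--     'hackernews.com', 'news.ycombinator.com',
--
--     # Blogging platforms
--     'medium.com', 'substack.com', 'wordpress.com', 'blogger.com',
--     'dev.to', 'hashnode.com', 'ghost.io',
--
--     # Review/Comparison sites
--     'g2.com', 'capterra.com', 'trustpilot.com', 'producthunt.com',
--     'getapp.com', 'softwareadvice.com', 'trustradius.com',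
--
--     # Video platforms (reviews/tutorials)
--     'youtube.com', 'vimeo.com',
--
--     # Q&A and forums
--     'answers.com', 'yahoo.com/answers',
-- }
--
-- def is_content_site(url):
--     """
--     Check if URL belongs to a content/discussion site.
--
--     Content sites discuss, review, or compare products but are NOT
--     first-party product sites themselves.
--
--     Args:
--         url: URL string to check
--
--     Returns:
--         True if URL is from a content site, False otherwise
--     """
--     if not url or not isinstance(url, str):
--         return False
--
--     url_lower = url.lower()
--
--     # Extract domain from URL (between :// and next /)
--     # Handle URLs with or without paths
--     if '://' not in url_lower:
--         return False
--
--     # Get the part after ://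
--     after_protocol = url_lower.split('://', 1)[1]
--
--     # Extract domain (everything before first / or end of string)
--     if '/' in after_protocol:
--         domain_part = after_protocol.split('/')[0]
--     else:
--         domain_part = after_protocol
--
--     # Remove port if present
--     if ':' in domain_part:
--         domain_part = domain_part.split(':')[0]
--
--     # Check if domain matches any content site
--     for content_domain in CONTENT_SITE_DOMAINS:
--         # Match exact domain or any subdomain
--         # e.g., reddit.com, www.reddit.com, old.reddit.com, docs.reddit.com
--         if domain_part == content_domain or domain_part.endswith('.' + content_domain):
--             return True
--
--     return False
-- ===== SOURCE B (Python) =====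
-- CONTENT_SITE_DOMAINS = {
--     # Social/Discussion platforms
--     'reddit.com', 'quora.com', 'stackexchange.com', 'stackoverflow.com',
--     'hackernews.com', 'news.ycombinator.com',
--
--     # Blogging platforms
--     'medium.com', 'substack.com', 'wordpress.com', 'blogger.com',
--     'dev.to', 'hashnode.com', 'ghost.io',
--
--     # Review/Comparison sites
--     'g2.com', 'capterra.com', 'trustpilot.com', 'producthunt.com',
--     'getapp.com', 'softwareadvice.com', 'trustradius.com',
--
--     # Video platforms (reviews/tutorials)
--     'youtube.com', 'vimeo.com',
--
--     # Q&A and forums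
--     'answers.com', 'yahoo.com/answers',
-- }
--
--
-- def _domain(url):
--     """Extract the lowercased host part of url, or None if there is none.
--
--     Same hand-rolled parse as before: text between '://' and the next '/',
--     with any ':port' stripped.
--     """
--     if not url or not isinstance(url, str):
--         return None
--     url_lower = url.lower()
--     if '://' not in url_lower:
--         return None
--     after_protocol = url_lower.split('://', 1)[1]
--     if '/' in after_protocol:
--         domain_part = after_protocol.split('/')[0]
--     else:
--         domain_part = after_protocol
--     if ':' in domain_part:
--         domain_part = domain_part.split(':')[0]
--     return domain_part
--
--
-- def is_content_site(url):
--     """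
--     Check if URL belongs to a content/discussion site.
--
--     Instead of scanning every known domain and testing ==/endswith, walk the
--     dot-aligned suffixes of the host (stripping one label at a time) and do a
--     single set-membership test per suffix.
--     """
--     candidate = _domain(url)
--     if candidate is None:
--         return False
--     while True:
--         if candidate in CONTENT_SITE_DOMAINS:
--             return True
--         dot = candidate.find('.')
--         if dot == -1:
--             return False
--         candidate = candidate[dot + 1:]
-- ===== Notes on version B (the rewrite author's own statement) =====
-- stated objective: idiomatic
-- what changed: The URL parsing is kept verbatim (factored into a _domain helper), but A's final scan over all 24 known domains testing ==/endswith per domain is replaced by walking the dot-aligned suffixes of the host (stripping one leading label at a time) with a single set-membership test per suffix.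
import Mathlib
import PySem

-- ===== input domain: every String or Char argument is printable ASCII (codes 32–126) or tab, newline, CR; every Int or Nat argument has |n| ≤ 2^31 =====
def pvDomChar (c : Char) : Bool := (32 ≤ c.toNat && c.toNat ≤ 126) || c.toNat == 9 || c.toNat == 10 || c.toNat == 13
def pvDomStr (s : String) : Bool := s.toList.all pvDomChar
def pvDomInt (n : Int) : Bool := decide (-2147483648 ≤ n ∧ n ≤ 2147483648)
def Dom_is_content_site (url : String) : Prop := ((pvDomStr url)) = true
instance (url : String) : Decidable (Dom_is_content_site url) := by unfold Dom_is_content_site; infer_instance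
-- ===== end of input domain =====

-- B replaces A's scan over all known domains (==/endswith per domain) by walking the
-- dot-aligned suffixes of the host and doing one set-membership test per suffix (idiomatic).

-- the module constant CONTENT_SITE_DOMAINS (shared by Source A and Source B), in source order
def contentDomains : List (List Char) :=
  ["reddit.com".toList, "quora.com".toList, "stackexchange.com".toList, "stackoverflow.com".toList,
   "hackernews.com".toList, "news.ycombinator.com".toList,
   "medium.com".toList, "substack.com".toList, "wordpress.com".toList, "blogger.com".toList,
   "dev.to".toList, "hashnode.com".toList, "ghost.io".toList,
   "g2.com".toList, "capterra.com".toList, "trustpilot.com".toList, "producthunt.com".toList,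
   "getapp.com".toList, "softwareadvice.com".toList, "trustradius.com".toList,
   "youtube.com".toList, "vimeo.com".toList,
   "answers.com".toList, "yahoo.com/answers".toList]

-- ===== PORT A =====
def is_content_site (url : String) : Bool :=
  if url.toList == [] then false            -- 'if not url' (isinstance is always true here)
  else
    let url_lower := PySem.Chars.lower url.toList
    if !PySem.Chars.isIn "://".toList url_lower then false
    else
      -- url_lower.split('://', 1)[1]  (the guard above makes the index total)
      let after_protocol := ((PySem.Chars.splitMax? url_lower "://".toList 1).getD []).getD 1 []
      let domain_part :=
        if PySem.Chars.isIn "/".toList after_protocol then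
          (PySem.Chars.splitOn after_protocol "/".toList).getD 0 []
        else after_protocol
      let domain_part :=
        if PySem.Chars.isIn ":".toList domain_part then
          (PySem.Chars.splitOn domain_part ":".toList).getD 0 []
        else domain_part
      -- for content_domain in CONTENT_SITE_DOMAINS: if == or endswith('.'+d): return True
      contentDomains.any (fun d => domain_part == d || PySem.Chars.endswith domain_part ('.' :: d))

-- ===== PORT B =====
-- Source B helper _domain(url): the same hand-rolled parse, returning None when A returns False early
def domainOf (url : String) : Option (List Char) :=
  if url.toList == [] then none
  else
    let url_lower := PySem.Chars.lower url.toList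
    if !PySem.Chars.isIn "://".toList url_lower then none
    else
      let after_protocol := ((PySem.Chars.splitMax? url_lower "://".toList 1).getD []).getD 1 []
      let domain_part :=
        if PySem.Chars.isIn "/".toList after_protocol then
          (PySem.Chars.splitOn after_protocol "/".toList).getD 0 []
        else after_protocol
      let domain_part :=
        if PySem.Chars.isIn ":".toList domain_part then
          (PySem.Chars.splitOn domain_part ":".toList).getD 0 []
        else domain_part
      some domain_part

-- Source B main loop: strip one leading label at a time, one set lookup per suffix
def suffixCheck (cand : List Char) : Bool :=
  if (PySem.Set.ofList contentDomains).contains cand then true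
  else
    let dot := PySem.Chars.find cand ['.']
    if dot = -1 then false
    else suffixCheck (PySem.Chars.slice cand (some (dot + 1)) none)   -- candidate[dot+1:]
termination_by cand.length
decreasing_by
  · rename_i hdot
    have h0 : 0 ≤ PySem.Chars.find cand ['.'] := by
      have := PySem.Chars.neg_one_le_find cand ['.']; omega
    have hne : cand ≠ [] := by
      intro h; subst h; revert hdot; decide
    have h1 : 0 ≤ PySem.Chars.find cand ['.'] + 1 := by omega
    simp only [PySem.Chars.slice, PySem.List.slice_from _ h1, List.length_drop]
    have hlen : 0 < cand.length := List.length_pos_iff.mpr hne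
    omega

def is_content_site_alt (url : String) : Bool :=
  match domainOf url with
  | none => false
  | some candidate => suffixCheck candidate

-- ===== PRECONDITION & SPEC =====
def Spec_is_content_site (url : String) (out : Bool) : Prop := out = is_content_site_alt url
instance (url : String) (out : Bool) : Decidable (Spec_is_content_site url out) := by unfold Spec_is_content_site; infer_instance

-- ===== CLAIM (what is proved, stated in full; the proofs are below) =====
def Claim_equal_is_content_site : Prop := ∀ (url : String), Dom_is_content_site url → Spec_is_content_site url (is_content_site url)

-- ===== LEMMAS AND PROOFS =====

-- A's per-domain test, as a predicate of the host string
def checkA (s : List Char) : Bool :=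
  contentDomains.any (fun d => s == d || PySem.Chars.endswith s ('.' :: d))

-- a dot-aligned suffix of pre ++ '.'::t with '.' ∉ pre is t itself or a dot-aligned suffix of t
lemma aux_suffix (pre : List Char) (t d : List Char) (hp : '.' ∉ pre)
    (h : ('.' :: d) <:+ (pre ++ '.' :: t)) : d = t ∨ ('.' :: d) <:+ t := by
  induction pre with
  | nil =>
    simp only [List.nil_append] at h
    rcases List.suffix_cons_iff.mp h with h1 | h1
    · left; exact (List.cons.injEq _ _ _ _ ▸ h1).2
    · right; exact h1
  | cons c pre ih =>
    simp only [List.cons_append] at h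
    rcases List.suffix_cons_iff.mp h with h1 | h1
    · exfalso; apply hp; rw [show c = '.' from (List.cons.injEq _ _ _ _ ▸ h1).1.symm]
      exact List.mem_cons_self
    · exact ih (fun hm => hp (List.mem_cons_of_mem _ hm)) h1

lemma mem_infix {s : List Char} (h : '.' ∈ s) : ['.'] <:+: s := by
  rcases List.append_of_mem h with ⟨l, r, rfl⟩
  exact ⟨l, r, by simp⟩

-- decomposition of s at its first dot
lemma find_dot_decomp (s : List Char) (h : 0 ≤ PySem.Chars.find s ['.']) :
    '.' ∉ s.take (PySem.Chars.find s ['.']).toNat ∧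
    s = s.take (PySem.Chars.find s ['.']).toNat ++ '.' :: s.drop ((PySem.Chars.find s ['.']).toNat + 1) := by
  obtain ⟨hpre, hmin⟩ := PySem.Chars.find_spec h
  set n := (PySem.Chars.find s ['.']).toNat with hn
  have hlt : n < s.length := by
    rcases hpre with ⟨r, hr⟩
    have : (List.drop n s).length = 1 + r.length := by rw [← hr]; simp; omega
    simp only [List.length_drop] at this
    omega
  have hget : s[n] = '.' := by
    rcases hpre with ⟨r, hr⟩
    have := List.drop_eq_getElem_cons hlt
    rw [this] at hr
    exact (List.cons.injEq _ _ _ _ ▸ hr).1.symm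
  constructor
  · intro hmem
    obtain ⟨i, hi, hgi⟩ := List.getElem_of_mem hmem
    have hil : i < n := by simp at hi; omega
    apply hmin i hil
    have : s[i]'(by omega) = '.' := by
      rw [← hgi]; simp [List.getElem_take]
    rw [List.drop_eq_getElem_cons (by omega : i < s.length), this]
    exact ⟨_, rfl⟩
  · conv_lhs => rw [← List.take_append_drop n s]
    congr 1
    rw [List.drop_eq_getElem_cons hlt, hget]

lemma checkA_iff (s : List Char) :
    checkA s = true ↔ ∃ d ∈ contentDomains, s = d ∨ ('.' :: d) <:+ s := by
  simp only [checkA, List.any_eq_true, Bool.or_eq_true, beq_iff_eq, PySem.Chars.endswith_iff]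

-- stripping the first label does not change A's test, provided s itself is not a known domain
lemma checkA_step (s : List Char) (hmem : s ∉ contentDomains)
    (h : 0 ≤ PySem.Chars.find s ['.']) :
    checkA (s.drop ((PySem.Chars.find s ['.']).toNat + 1)) = checkA s := by
  obtain ⟨hpre, hdec⟩ := find_dot_decomp s h
  set n := (PySem.Chars.find s ['.']).toNat
  set t := s.drop (n + 1) with ht
  rw [Bool.eq_iff_iff, checkA_iff, checkA_iff]
  constructor
  · rintro ⟨d, hd, hcase⟩
    refine ⟨d, hd, Or.inr ?_⟩
    rcases hcase with rfl | hsuf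
    · rw [hdec]; exact List.suffix_append _ _
    · rw [hdec]
      exact hsuf.trans ((List.suffix_cons '.' t).trans (List.suffix_append _ _))
  · rintro ⟨d, hd, hcase⟩
    rcases hcase with rfl | hsuf
    · exact absurd hd hmem
    · rw [hdec] at hsuf
      rcases aux_suffix _ t d hpre hsuf with heq | h2
      · exact ⟨d, hd, Or.inl heq.symm⟩
      · exact ⟨d, hd, Or.inr h2⟩

lemma suffixCheck_eq_aux : ∀ (n : Nat) (s : List Char), s.length ≤ n → suffixCheck s = checkA s := by
  intro n
  induction n with
  | zero =>
    intro s hs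
    have : s = [] := List.length_eq_zero_iff.mp (Nat.le_zero.mp hs)
    subst this; rw [suffixCheck]; decide
  | succ n ih =>
    intro s hs
    rw [suffixCheck]
    by_cases hc : (PySem.Set.ofList contentDomains).contains s
    · have hmem : s ∈ contentDomains := (PySem.Set.mem_ofList contentDomains s).mp
        ((PySem.Set.contains_iff _ s).mp hc)
      rw [if_pos hc, Bool.eq_iff_iff, checkA_iff]
      simp only [true_iff]
      exact ⟨s, hmem, Or.inl rfl⟩
    · rw [if_neg hc]
      have hmem : s ∉ contentDomains := fun hm =>
        hc ((PySem.Set.contains_iff _ s).mpr ((PySem.Set.mem_ofList contentDomains s).mpr hm))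
      by_cases hdot : PySem.Chars.find s ['.'] = -1
      · rw [if_pos hdot, Bool.eq_iff_iff, checkA_iff]
        simp only [Bool.false_eq_true, false_iff]
        rintro ⟨d, hd, hcase⟩
        rcases hcase with rfl | hsuf
        · exact hmem hd
        · have : '.' ∈ s := hsuf.subset List.mem_cons_self
          exact (PySem.Chars.find_eq_neg_one_iff s ['.']).mp hdot (mem_infix this)
      · rw [if_neg hdot]
        have h0 : 0 ≤ PySem.Chars.find s ['.'] := by
          have := PySem.Chars.neg_one_le_find s ['.']; omega
        have h1 : 0 ≤ PySem.Chars.find s ['.'] + 1 := by omega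
        have htn : (PySem.Chars.find s ['.'] + 1).toNat = (PySem.Chars.find s ['.']).toNat + 1 := by omega
        rw [show PySem.Chars.slice s (some (PySem.Chars.find s ['.'] + 1)) none
              = s.drop ((PySem.Chars.find s ['.']).toNat + 1) by
            simp only [PySem.Chars.slice, PySem.List.slice_from _ h1, htn]]
        have hne : s ≠ [] := by
          intro h; subst h; exact hdot (by decide)
        have hlen : 0 < s.length := List.length_pos_iff.mpr hne
        rw [ih _ (by simp only [List.length_drop]; omega)]
        exact checkA_step s hmem h0

lemma suffixCheck_eq (s : List Char) : suffixCheck s = checkA s :=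
  suffixCheck_eq_aux s.length s le_rfl

-- ===== VERDICT (by name: the statement is the Claim_ definition above) =====
theorem is_content_site_spec : Claim_equal_is_content_site := by
  intro url _
  unfold Spec_is_content_site is_content_site is_content_site_alt domainOf
  by_cases h1 : url.toList == []
  · simp [h1]
  · by_cases h2 : PySem.Chars.isIn [':', '/', '/'] (PySem.Chars.lower url.toList) = true
    · simp [h1, h2, suffixCheck_eq, checkA]
    · rw [Bool.not_eq_true] at h2
      simp [h1, h2]
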